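-- pv_equiv track=rewrite | github.com/kuntumseroja/techdocgen-new | src/architecture_synthesizer.py | _group_files_by_project
-- ===== SOURCE A (Python) =====
-- from typing import Dict, Any, List, Optional
--
-- def _group_files_by_project(files: List[Dict[str, Any]]) -> Dict[str, List[Dict[str, Any]]]:
--     """Group files by their project/directory"""
--     grouped = {}
--     for file_info in files:
--         path = file_info.get('relative_path', file_info.get('path', ''))
--         parts = path.split('/')
--         project = parts[0] if len(parts) > 1 else 'root'
--
--         if project not in grouped:
--             grouped[project] = []
--         grouped[project].append(file_info)
--
--     return grouped
-- ===== SOURCE B (Python) =====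
-- def _group_files_by_project(files):
--     """Group files by their project/directory"""
--     def key(f):
--         path = f.get('relative_path', f.get('path', ''))
--         parts = path.split('/')
--         return parts[0] if len(parts) > 1 else 'root'
--     keys = [key(f) for f in files]
--     return {k: [f for f, kk in zip(files, keys) if kk == k]
--             for k in dict.fromkeys(keys)}
-- ===== Notes on version B (the rewrite author's own statement) =====
-- stated objective: alternative
-- what changed: Instead of one pass that mutates a dict entry per file, B precomputes each file's project key, dedups the keys in first-occurrence order, and builds the result with one filter pass per distinct key.
import Mathlib
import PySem

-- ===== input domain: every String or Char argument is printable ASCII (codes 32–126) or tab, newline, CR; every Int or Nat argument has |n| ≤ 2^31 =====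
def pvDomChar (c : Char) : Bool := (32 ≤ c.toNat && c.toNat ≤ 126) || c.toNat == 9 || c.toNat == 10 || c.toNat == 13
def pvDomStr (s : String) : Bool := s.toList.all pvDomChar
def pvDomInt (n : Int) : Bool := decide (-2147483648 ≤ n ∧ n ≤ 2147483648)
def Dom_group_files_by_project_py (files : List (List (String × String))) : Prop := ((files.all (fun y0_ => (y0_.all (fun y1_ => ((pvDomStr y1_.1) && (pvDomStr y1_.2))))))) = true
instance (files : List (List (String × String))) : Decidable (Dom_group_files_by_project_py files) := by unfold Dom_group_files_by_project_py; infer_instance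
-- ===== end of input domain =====

-- B replaces A's single mutating-dict pass by a per-distinct-key filter pass (dedup keys, then one
-- filter per key); alternative decomposition, same results, not claimed faster.

-- shared helper: the project key of one file dict (identical expression in both Pythons)
def pvKey (f : List (String × String)) : String :=
  let path := (PySem.Dict.mk f).getD "relative_path" ((PySem.Dict.mk f).getD "path" "")
  let parts := (PySem.Str.split? path "/").getD []
  if parts.length > 1 then parts.headI else "root"

-- ===== PORT A =====
def group_files_by_project_py (files : List (List (String × String))) : List (String × List (List (String × String))) :=
  (files.foldl (fun grouped f =>
      let project := pvKey f
      let grouped :=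
        if grouped.contains project then grouped
        else grouped.insert project ([] : List (List (String × String)))
      grouped.insert project (grouped.getD project [] ++ [f]))
    PySem.Dict.empty).items

-- ===== PORT B =====
def group_files_by_project_py_alt (files : List (List (String × String))) : List (String × List (List (String × String))) :=
  let keys := files.map pvKey
  (PySem.List.dedup keys).map (fun k =>
    (k, ((files.zip keys).filter (fun p => p.2 == k)).map (fun p => p.1)))

-- ===== PRECONDITION & SPEC =====
def Spec_group_files_by_project_py (files : List (List (String × String))) (out : List (String × List (List (String × String)))) : Prop := out = group_files_by_project_py_alt files
instance (files : List (List (String × String))) (out : List (String × List (List (String × String)))) : Decidable (Spec_group_files_by_project_py files out) := by unfold Spec_group_files_by_project_py; infer_instance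

-- ===== CLAIM (what is proved, stated in full; the proofs are below) =====
def Claim_equal_group_files_by_project_py : Prop := ∀ (files : List (List (String × String))), Dom_group_files_by_project_py files → Spec_group_files_by_project_py files (group_files_by_project_py files)

-- ===== LEMMAS AND PROOFS =====

-- A's loop body (setdefault-then-append) is exactly Dict.modify with default []
theorem pv_step_eq (g : PySem.Dict String (List (List (String × String)))) (f : List (String × String)) :
    (let project := pvKey f
     let g' := if g.contains project then g
               else g.insert project ([] : List (List (String × String)))
     g'.insert project (g'.getD project [] ++ [f]))
    = g.modify (pvKey f) [] (· ++ [f]) := by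
  simp only [PySem.Dict.modify]
  by_cases h : g.contains (pvKey f) = true
  · simp [h]
  · simp only [Bool.not_eq_true] at h
    simp [h, PySem.Dict.insert_insert_self, PySem.Dict.getD_insert_self,
      PySem.Dict.getD_of_not_contains _ _ h]

theorem pv_filter_swap (files : List (List (String × String))) (k : String) :
    ((files.zip (files.map pvKey)).filter (fun p => p.2 == k)).map (fun p => p.1)
    = ((files.map (fun f => (pvKey f, f))).filter (fun p => p.1 == k)).map (fun p => p.2) := by
  induction files with
  | nil => rfl
  | cons f fs ih =>
    by_cases h : pvKey f == k <;> simp [h, ih]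

-- ===== VERDICT (by name: the statement is the Claim_ definition above) =====
theorem group_files_by_project_py_spec : Claim_equal_group_files_by_project_py := by
  intro files _
  unfold Spec_group_files_by_project_py group_files_by_project_py group_files_by_project_py_alt
  simp only []
  have hfold :
      (files.foldl (fun grouped f =>
        let project := pvKey f
        let grouped :=
          if grouped.contains project then grouped
          else grouped.insert project ([] : List (List (String × String)))
        grouped.insert project (grouped.getD project [] ++ [f]))
        PySem.Dict.empty)
      = files.foldl (fun d f => d.modify (pvKey f) [] (· ++ [f])) PySem.Dict.empty := by
    congr 1
    funext d f
    exact pv_step_eq d f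
  rw [hfold]
  set d := files.foldl (fun d f => d.modify (pvKey f) [] (· ++ [f])) PySem.Dict.empty with hd
  have hnd : d.keys.Nodup := by
    rw [hd]
    exact PySem.Dict.nodup_keys_foldl_modify_key files pvKey [] (fun _ f v => v ++ [f]) _ (by simp)
  have hkeys : d.keys = PySem.List.dedup (files.map pvKey) := by
    rw [hd, PySem.Dict.keys_foldl_modify_key files pvKey [] (fun _ f v => v ++ [f]),
      PySem.List.dedup_eq_ofList]
    simp [PySem.Dict.keys_empty, PySem.Set.update_nil_left]
  have hget : ∀ k, d.getD k [] = ((files.zip (files.map pvKey)).filter (fun p => p.2 == k)).map (fun p => p.1) := by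
    intro k
    have hm : ((files.map (fun f => (pvKey f, f))).foldl
        (fun d p => d.modify p.1 [] (· ++ [p.2])) PySem.Dict.empty)
        = files.foldl (fun d f => d.modify (pvKey f) [] (· ++ [f])) PySem.Dict.empty :=
      List.foldl_map
    rw [pv_filter_swap, hd, ← hm]
    have := PySem.Dict.getD_foldl_modify_append (files.map (fun f => (pvKey f, f))) PySem.Dict.empty k
    simpa using this
  rw [PySem.Dict.items_eq_map_keys d hnd [], hkeys]
  apply List.map_congr_left
  intro k _
  rw [hget k]
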